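-- pv_equiv track=rewrite | github.com/rinAkhm/ML_dataset | Services/Service1.py | get_course
-- ===== SOURCE A (Python) =====
-- def get_course(pivot):
--     course_list = []
--     for i in pivot:
--         for keys in pivot[i]:
--             disipline = {}
--             disipline['CourseName'] = keys
--             course_list.append(disipline)
--     result = list({d['CourseName']: d for d in course_list}.values())
--     newlist = sorted(result, key=lambda k: k['CourseName'])
--     return newlist
-- ===== SOURCE B (Python) =====
-- def get_course(pivot):
--     all_names = []
--     for sub in pivot.values():
--         all_names.extend(sub)
--     all_names.sort()
--     result = []
--     for name in all_names:
--         if not result or result[-1]['CourseName'] != name: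
--             result.append({'CourseName': name})
--     return result
-- ===== Notes on version B (the rewrite author's own statement) =====
-- stated objective: alternative
-- what changed: B sorts the flat list of names WITH duplicates and removes duplicates in a single adjacent-comparison scan while emitting the dicts, instead of A's dict-comprehension hash dedup followed by sorting dict objects by a key lookup. Pre_ excludes only association lists with duplicate outer keys, which no Python dict input can represent.
import Mathlib
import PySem

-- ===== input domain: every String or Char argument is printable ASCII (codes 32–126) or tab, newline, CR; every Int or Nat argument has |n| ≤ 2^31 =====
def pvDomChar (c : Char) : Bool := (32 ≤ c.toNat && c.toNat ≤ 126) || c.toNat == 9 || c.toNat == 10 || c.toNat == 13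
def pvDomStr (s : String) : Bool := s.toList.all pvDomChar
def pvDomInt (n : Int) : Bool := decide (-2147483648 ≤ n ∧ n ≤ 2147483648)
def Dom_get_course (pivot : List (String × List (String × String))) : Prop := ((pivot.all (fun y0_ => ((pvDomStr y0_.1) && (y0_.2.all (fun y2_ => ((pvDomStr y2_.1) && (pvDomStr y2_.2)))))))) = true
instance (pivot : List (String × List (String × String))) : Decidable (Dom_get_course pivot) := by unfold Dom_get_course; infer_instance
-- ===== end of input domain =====

-- B sorts the flat list of names WITH duplicates and removes duplicates in one adjacent-comparison
-- scan while emitting the dicts, instead of A's dict-comprehension hash dedup followed by sorting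
-- dict objects by a key lookup.  Equivalence of the RETURN value on Pre_ (distinct outer keys).

-- ===== PORT A =====
-- outer dict: 'for i in pivot' iterates the pairs; 'pivot[i]' is the first-match lookup;
-- 'for keys in pivot[i]' iterates the inner dict's keys = its distinct keys in first-occurrence
-- order (PySem.Set.ofList of the pair list's keys) — exact for the dict the Python receives.
def get_course (pivot : List (String × List (String × String))) : List (List (String × String)) :=
  let course_list : List (List (String × String)) :=
    pivot.foldl (fun cl p =>
      (PySem.Set.ofList (((PySem.Dict.mk pivot).getD p.1 []).map Prod.fst)).foldl
        (fun cl keys => cl ++ [[("CourseName", keys)]]) cl) []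
  let result : List (List (String × String)) :=
    (course_list.foldl
      (fun d disc => d.insert ((PySem.Dict.mk disc).getD "CourseName" "") disc)
      PySem.Dict.empty).values
  PySem.List.sorted result (fun k => (PySem.Dict.mk k).getD "CourseName" "") false

-- ===== PORT B =====
-- 'all_names.extend(sub)' appends the inner dict's (distinct) keys; 'all_names.sort()' sorts in
-- place (the local list, unobservable); 'result[-1]' is PySem.List.pyGet? result (-1).
def get_course_alt (pivot : List (String × List (String × String))) : List (List (String × String)) :=
  let all_names : List String :=
    pivot.foldl (fun acc p => acc ++ (PySem.Set.ofList (p.2.map Prod.fst) : List String)) []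
  let sorted_names : List String := PySem.List.sorted all_names (fun n => n) false
  sorted_names.foldl
    (fun result name =>
      if result.isEmpty ||
         ((PySem.Dict.mk ((PySem.List.pyGet? result (-1)).getD [])).getD "CourseName" "" != name)
      then result ++ [[("CourseName", name)]] else result) []

-- ===== PRECONDITION & SPEC =====
-- Pre_ excludes association lists with duplicate outer keys: as a Python dict such an input
-- collapses (later values overwrite earlier ones), so the list does not determine the dict the
-- Python programs actually receive — a defensible duplicate-key corner, excluded.
def Pre_get_course (pivot : List (String × List (String × String))) : Prop :=
  (pivot.map Prod.fst).Nodup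
instance (pivot : List (String × List (String × String))) : Decidable (Pre_get_course pivot) := by
  unfold Pre_get_course; infer_instance
def pvWitness_get_course : (List (String × List (String × String))) :=
  [("a", [("x", "1"), ("z", "2")]), ("b", [("x", "3")])]
def Spec_get_course (pivot : List (String × List (String × String))) (out : List (List (String × String))) : Prop := out = get_course_alt pivot
instance (pivot : List (String × List (String × String))) (out : List (List (String × String))) : Decidable (Spec_get_course pivot out) := by unfold Spec_get_course; infer_instance

-- ===== CLAIM (what is proved, stated in full; the proofs are below) =====
def Claim_equal_get_course : Prop := ∀ (pivot : List (String × List (String × String))), Dom_get_course pivot → Pre_get_course pivot → Spec_get_course pivot (get_course pivot)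

-- ===== LEMMAS AND PROOFS =====

-- the one-entry dict {'CourseName': n}
def pvToD (n : String) : List (String × String) := [("CourseName", n)]

theorem pvKeyf_toD (n : String) : (PySem.Dict.mk (pvToD n)).getD "CourseName" "" = n := by
  simp [pvToD, PySem.Dict.getD, PySem.Dict.get?, PySem.Dict.items, List.find?]

-- all inner keys of pivot, deduplicated per inner dict, in order
def pvNames (pivot : List (String × List (String × String))) : List String :=
  pivot.flatMap (fun p => PySem.Set.ofList (p.2.map Prod.fst))

theorem pv_foldl_congr {α β : Type} (l : List α) (f g : β → α → β) (a : β)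
    (h : ∀ x ∈ l, ∀ acc, f acc x = g acc x) : l.foldl f a = l.foldl g a := by
  induction l generalizing a with
  | nil => rfl
  | cons x t ih =>
      simp only [List.foldl_cons, h x (List.mem_cons_self), ih _ (fun y hy acc => h y (List.mem_cons_of_mem _ hy) acc)]

-- first-match lookup in a Nodup-keyed association list returns the pair's own value
theorem pv_lookup_nodup (pivot : List (String × List (String × String)))
    (hnd : (pivot.map Prod.fst).Nodup) (p : String × List (String × String)) (hp : p ∈ pivot) :
    (PySem.Dict.mk pivot).getD p.1 [] = p.2 := by
  induction pivot with
  | nil => cases hp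
  | cons q t ih =>
      simp only [List.map_cons, List.nodup_cons] at hnd
      rcases List.mem_cons.mp hp with h | h
      · subst h
        simp [PySem.Dict.getD, PySem.Dict.get?, PySem.Dict.items, List.find?]
      · have hne : (q.1 == p.1) = false := by
          have : q.1 ≠ p.1 := fun he => hnd.1 (he ▸ List.mem_map_of_mem h)
          simpa using this
        have := ih hnd.2 h
        simpa [PySem.Dict.getD, PySem.Dict.get?, PySem.Dict.items, List.find?, hne] using this

-- A's double loop builds exactly the list of one-entry dicts for pvNames
theorem pv_course_list (pivot : List (String × List (String × String)))
    (hnd : (pivot.map Prod.fst).Nodup) :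
    pivot.foldl (fun cl p =>
      (PySem.Set.ofList (((PySem.Dict.mk pivot).getD p.1 []).map Prod.fst)).foldl
        (fun cl keys => cl ++ [[("CourseName", keys)]]) cl) []
    = (pvNames pivot).map pvToD := by
  have h1 : ∀ (ks : List String) (cl : List (List (String × String))),
      ks.foldl (fun cl keys => cl ++ [[("CourseName", keys)]]) cl = cl ++ ks.map pvToD := by
    intro ks
    induction ks with
    | nil => intro cl; simp
    | cons k t ih => intro cl; simp [ih, pvToD]
  have h2 : pivot.foldl (fun cl p =>
      (PySem.Set.ofList (((PySem.Dict.mk pivot).getD p.1 []).map Prod.fst)).foldl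
        (fun cl keys => cl ++ [[("CourseName", keys)]]) cl) []
      = pivot.foldl (fun cl p => cl ++ (PySem.Set.ofList (p.2.map Prod.fst)).map pvToD) [] := by
    apply pv_foldl_congr
    intro p hp acc
    rw [h1, pv_lookup_nodup pivot hnd p hp]
  rw [h2, PySem.List.foldl_append_eq_flatMap (fun p => (PySem.Set.ofList (p.2.map Prod.fst)).map pvToD) pivot []]
  simp [pvNames, List.map_flatMap]

-- the dedup dict {d['CourseName']: d for d in …} over one-entry dicts, as a set fold
theorem pv_dict_fold (L S : List String) :
    ((L.map pvToD).foldl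
      (fun d disc => d.insert ((PySem.Dict.mk disc).getD "CourseName" "") disc)
      (PySem.Dict.mk (S.map (fun n => (n, pvToD n))))).items
    = (PySem.Set.update S L).map (fun n => (n, pvToD n)) := by
  induction L generalizing S with
  | nil => simp [PySem.Set.update_nil, PySem.Dict.items]
  | cons n L ih =>
      have hk : ((PySem.Dict.mk (pvToD n)).getD "CourseName" "") = n := pvKeyf_toD n
      have hcont : (PySem.Dict.mk (S.map (fun n => (n, pvToD n)))).contains n = decide (n ∈ S) := by
        simp only [PySem.Dict.contains_mk, List.any_map, Function.comp_def]
        simp [List.any_beq']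
      by_cases hmem : n ∈ S
      · have hstep : (PySem.Dict.mk (S.map (fun n => (n, pvToD n)))).insert n (pvToD n)
            = PySem.Dict.mk (S.map (fun n => (n, pvToD n))) := by
          apply PySem.Dict.ext
          rw [PySem.Dict.items_insert_of_contains _ _ (by simp [hcont, hmem])]
          simp only [PySem.Dict.items, List.map_map]
          apply List.map_congr_left
          intro m _
          by_cases hmn : m = n
          · subst hmn; simp
          · simp [Function.comp_def, hmn]
        simp only [List.map_cons, List.foldl_cons, hk, hstep, ih S,
          PySem.Set.update_cons, PySem.Set.add_of_mem hmem]
      · have hstep : ((PySem.Dict.mk (S.map (fun n => (n, pvToD n)))).insert n (pvToD n))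
            = PySem.Dict.mk ((S ++ [n]).map (fun n => (n, pvToD n))) := by
          apply PySem.Dict.ext
          rw [PySem.Dict.items_insert_of_not_contains _ _ (by simp [hcont, hmem])]
          simp [PySem.Dict.items]
        simp only [List.map_cons, List.foldl_cons, hk, hstep,
          PySem.Set.update_cons, PySem.Set.add_of_not_mem hmem]
        exact ih (S ++ [n])

-- the values of the dedup dict are the one-entry dicts of the distinct names
theorem pv_values (N : List String) :
    ((N.map pvToD).foldl
      (fun d disc => d.insert ((PySem.Dict.mk disc).getD "CourseName" "") disc)
      PySem.Dict.empty).values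
    = (PySem.Set.update [] N).map pvToD := by
  have hfold := pv_dict_fold N []
  simp only [List.map_nil] at hfold
  rw [PySem.Dict.values.eq_1, PySem.Dict.empty.eq_1, hfold]
  simp [List.map_map, Function.comp_def]

-- sorting the one-entry dicts by their name equals mapping over the sorted names
theorem pv_sorted_map (N : List String) :
    PySem.List.sorted ((PySem.Set.ofList N).map pvToD)
      (fun k => (PySem.Dict.mk k).getD "CourseName" "") false
    = (PySem.List.sorted (PySem.Set.ofList N) (fun n => n) false).map pvToD := by
  apply PySem.List.sorted_eq_of_perm_of_pairwise_lt
  · exact (PySem.List.sorted_perm (PySem.Set.ofList N) (fun n => n) false).map pvToD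
  · have h := PySem.List.sorted_ofList_pairwise_lt (κ := String) N
    rw [List.pairwise_map]
    exact h.imp (fun {a b} hab => by simpa [pvKeyf_toD] using hab)

-- B's adjacent-dedup step, on the underlying name strings
def pvG (acc : List String) (n : String) : List String :=
  if acc.getLast? = some n then acc else acc ++ [n]

-- B's loop body over the wrapped one-entry dicts is pvG over the bare names
theorem pv_fold_map (M : List String) (acc : List String) :
    M.foldl
      (fun result name =>
        if result.isEmpty ||
           ((PySem.Dict.mk ((PySem.List.pyGet? result (-1)).getD [])).getD "CourseName" "" != name)
        then result ++ [[("CourseName", name)]] else result) (acc.map pvToD)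
    = (M.foldl pvG acc).map pvToD := by
  induction M generalizing acc with
  | nil => rfl
  | cons n M ih =>
      have hstep :
          (if (acc.map pvToD).isEmpty ||
              ((PySem.Dict.mk ((PySem.List.pyGet? (acc.map pvToD) (-1)).getD [])).getD "CourseName" "" != n)
           then acc.map pvToD ++ [[("CourseName", n)]] else acc.map pvToD)
          = (pvG acc n).map pvToD := by
        cases hacc : acc.getLast? with
        | none =>
            have hnil : acc = [] := List.getLast?_eq_none_iff.mp hacc
            subst hnil
            simp [pvG, pvToD]
        | some m =>
            have hne : acc ≠ [] := by intro h; subst h; simp at hacc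
            have hlast : (acc.map pvToD).getLast? = some (pvToD m) := by
              rw [List.getLast?_map, hacc]; rfl
            have hempty : (acc.map pvToD).isEmpty = false := by
              simp [hne]
            rw [PySem.List.pyGet?_neg_one, hlast]
            by_cases hmn : m = n
            · subst hmn
              simp [hempty, pvG, pvToD, hacc, PySem.Dict.getD, PySem.Dict.get?]
            · simp [hempty, pvG, pvToD, hacc, PySem.Dict.getD, PySem.Dict.get?, hmn]
      rw [List.foldl_cons, hstep, List.foldl_cons, ih (pvG acc n)]

-- the same with an empty starting accumulator (the shape the port produces)
theorem pv_fold_map_nil (M : List String) :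
    M.foldl
      (fun result name =>
        if result.isEmpty ||
           ((PySem.Dict.mk ((PySem.List.pyGet? result (-1)).getD [])).getD "CourseName" "" != name)
        then result ++ [[("CourseName", name)]] else result) []
    = (M.foldl pvG []).map pvToD := pv_fold_map M []

-- in a ≤-sorted list every member is ≤ the last element
theorem pv_mem_le_getLast (R : List String) (hR : R.Pairwise (· ≤ ·)) (m : String)
    (hm : R.getLast? = some m) (x : String) (hx : x ∈ R) : x ≤ m := by
  obtain ⟨R', rfl⟩ := List.getLast?_eq_some_iff.mp hm
  rcases List.mem_append.mp hx with h | h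
  · exact (List.pairwise_append.mp hR).2.2 x h m (List.mem_singleton_self m)
  · simp at h; exact le_of_eq h

theorem pv_ofList_append (M : List String) (x : String) :
    (PySem.Set.ofList (M ++ [x]) : List String) = PySem.Set.add (PySem.Set.ofList M) x := by
  rw [PySem.Set.ofList_eq_foldl, PySem.Set.ofList_eq_foldl, List.foldl_append]; rfl

-- ordered dedup of a ≤-sorted list is still ≤-sorted
theorem pv_ofList_pairwise (M : List String) (hM : M.Pairwise (· ≤ ·)) :
    (PySem.Set.ofList M : List String).Pairwise (· ≤ ·) := by
  induction M using List.reverseRecOn with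
  | nil => exact List.Pairwise.nil
  | append_singleton M x ih =>
      rw [pv_ofList_append]
      obtain ⟨h1, -, h3⟩ := List.pairwise_append.mp hM
      by_cases hx : x ∈ M
      · rw [PySem.Set.add_of_mem (by simpa [PySem.Set.mem_ofList] using hx)]
        exact ih h1
      · rw [PySem.Set.add_of_not_mem (by simpa [PySem.Set.mem_ofList] using hx)]
        refine List.pairwise_append.mpr ⟨ih h1, List.pairwise_singleton _ _, ?_⟩
        intro a ha b hb
        exact h3 a (by simpa [PySem.Set.mem_ofList] using ha) b hb

-- adjacent dedup of a ≤-sorted list is its ordered set of distinct elements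
theorem pv_foldG_sorted (M : List String) (hM : M.Pairwise (· ≤ ·)) :
    M.foldl pvG [] = (PySem.Set.ofList M : List String) := by
  induction M using List.reverseRecOn with
  | nil => rfl
  | append_singleton M x ih =>
      obtain ⟨h1, -, h3⟩ := List.pairwise_append.mp hM
      rw [List.foldl_append, ih h1, pv_ofList_append]
      by_cases hx : x ∈ M
      · have hxS : x ∈ (PySem.Set.ofList M : List String) := by simpa [PySem.Set.mem_ofList] using hx
        rw [PySem.Set.add_of_mem hxS]
        have hne : (PySem.Set.ofList M : List String) ≠ [] := List.ne_nil_of_mem hxS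
        obtain ⟨m, hm⟩ := Option.ne_none_iff_exists'.mp (mt List.getLast?_eq_none_iff.mp hne)
        have hmM : m ∈ M := by
          have : m ∈ (PySem.Set.ofList M : List String) := List.mem_of_getLast? hm
          simpa [PySem.Set.mem_ofList] using this
        have hxm : x ≤ m := pv_mem_le_getLast _ (pv_ofList_pairwise M h1) m hm x hxS
        have hmx : m ≤ x := h3 m hmM x (List.mem_singleton_self x)
        have hEq : m = x := le_antisymm hmx hxm
        subst hEq
        simp [List.foldl_cons, List.foldl_nil, pvG, hm]
      · have hxS : x ∉ (PySem.Set.ofList M : List String) := by simpa [PySem.Set.mem_ofList] using hx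
        rw [PySem.Set.add_of_not_mem hxS]
        simp only [List.foldl_cons, List.foldl_nil]
        unfold pvG
        split
        · rename_i h
          exact absurd (by simpa [PySem.Set.mem_ofList] using List.mem_of_getLast? h) hx
        · rfl

-- sorted(set(N)) = ordered dedup of sorted(N): same distinct names, both ≤-ordered
theorem pv_sorted_ofList_comm (N : List String) :
    PySem.List.sorted (PySem.Set.ofList N) (fun n => n) false
    = (PySem.Set.ofList (PySem.List.sorted N (fun n => n) false) : List String) := by
  apply PySem.List.sorted_id_eq_of_perm_of_pairwise
  · refine (List.perm_ext_iff_of_nodup (PySem.Set.nodup_ofList _) (PySem.Set.nodup_ofList _)).mpr ?_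
    intro a
    simp [PySem.Set.mem_ofList, PySem.List.mem_sorted]
  · exact pv_ofList_pairwise _ (PySem.List.sorted_pairwise N (fun n => n))

-- ===== VERDICT (by name: the statement is the Claim_ definition above) =====
theorem get_course_spec : Claim_equal_get_course := by
  intro pivot _ hpre
  unfold Spec_get_course get_course get_course_alt
  dsimp only
  rw [pv_course_list pivot hpre, pv_values, PySem.Set.update_nil_left, pv_sorted_map]
  rw [PySem.List.foldl_append_eq_flatMap
        (fun p => (PySem.Set.ofList (p.2.map Prod.fst) : List String)) pivot []]
  rw [pv_fold_map_nil, pv_foldG_sorted _ (PySem.List.sorted_pairwise _ (fun n => n))]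
  rw [pv_sorted_ofList_comm]
  rfl
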